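-- pv_equiv track=rewrite | github.com/osquitar19/Semanarios_Desktop | logica_resultados.py | aplicar_abreviaciones
-- ===== SOURCE A (Python) =====
-- def aplicar_abreviaciones(texto):
--     ABREVIACIONES = {
--         # Aquí se pueden definir abreviaciones específicas para resultados
--         "segundos": "s.",
--         "minutos": "min.",
--         ",": " , "
--     }
--     for clave in sorted(ABREVIACIONES, key=len, reverse=True):
--         texto = texto.replace(clave, ABREVIACIONES[clave])
--     return texto
-- ===== SOURCE B (Python) =====
-- def aplicar_abreviaciones(texto):
--     # One simultaneous left-to-right pass, trying the abbreviation keys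
--     # longest-first at each position (instead of three sequential replace passes).
--     out = []
--     i = 0
--     n = len(texto)
--     while i < n:
--         if texto.startswith("segundos", i):
--             out.append("s.")
--             i += 8
--         elif texto.startswith("minutos", i):
--             out.append("min.")
--             i += 7
--         elif texto[i] == ",":
--             out.append(" , ")
--             i += 1
--         else:
--             out.append(texto[i])
--             i += 1
--     return "".join(out)
-- ===== Notes on version B (the rewrite author's own statement) =====
-- stated objective: alternative
-- what changed: Replaces A's three sequential whole-text str.replace passes (keys sorted longest-first) by a single left-to-right scan that at each position tries the abbreviation keys longest-first, emits the replacement and advances past the match, so the text is traversed once and replacements never cascade.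
-- intended difference: On texts containing the substring 'minutosegundos', A's first pass rewrites the shared 's' ('minuto'+'segundos' -> 'minutos.') creating a fresh 'minutos' that the second pass abbreviates again (A('minutosegundos') = 'min..'), while B abbreviates each occurrence once, longest match first ('min.egundos'); the cascaded double abbreviation is an artefact of A's pass ordering and B's non-cascading simultaneous replacement is the intended behaviour. — e.g. on aplicar_abreviaciones("minutosegundos"): A returns "min..", B returns "min.egundos"
import Mathlib
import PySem

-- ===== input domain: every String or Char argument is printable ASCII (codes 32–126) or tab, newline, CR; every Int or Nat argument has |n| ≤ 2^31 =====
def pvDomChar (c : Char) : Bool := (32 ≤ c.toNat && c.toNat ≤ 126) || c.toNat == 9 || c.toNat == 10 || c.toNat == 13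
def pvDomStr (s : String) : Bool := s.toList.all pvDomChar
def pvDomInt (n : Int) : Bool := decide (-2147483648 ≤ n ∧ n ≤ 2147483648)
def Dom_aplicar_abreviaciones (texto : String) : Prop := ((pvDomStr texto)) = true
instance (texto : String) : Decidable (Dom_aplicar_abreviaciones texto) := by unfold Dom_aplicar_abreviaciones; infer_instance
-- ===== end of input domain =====

-- B replaces A's three sequential replace passes by one longest-first left-to-right scan
-- (objective: alternative single-pass algorithm); on texts containing "minutosegundos"
-- A's passes cascade and B intentionally differs (see D_ below).

-- ===== PORT A =====
def aplicar_abreviaciones (texto : String) : String :=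
  -- ABREVIACIONES dict literal; the loop over sorted(ABREVIACIONES, key=len, reverse=True)
  -- is the fold below; ABREVIACIONES[clave] always hits, ported as getD with unused default.
  let abreviaciones : PySem.Dict String String :=
    PySem.Dict.ofList [("segundos", "s."), ("minutos", "min."), (",", " , ")]
  (PySem.List.sorted abreviaciones.keys (fun k => (PySem.Str.len k : Int)) true).foldl
    (fun t clave => PySem.Str.replace t clave (abreviaciones.getD clave "")) texto

-- ===== PORT B =====
-- Source B's while-loop with cursor i over texto: ported as recursion on the remaining characters.
def segClave : List Char := ['s', 'e', 'g', 'u', 'n', 'd', 'o', 's']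
def minClave : List Char := ['m', 'i', 'n', 'u', 't', 'o', 's']

def altGo : List Char → List Char
  | [] => []
  | c :: t =>
    if segClave.isPrefixOf (c :: t) then 's' :: '.' :: altGo (t.drop 7)
    else if minClave.isPrefixOf (c :: t) then 'm' :: 'i' :: 'n' :: '.' :: altGo (t.drop 6)
    else if c = ',' then ' ' :: ',' :: ' ' :: altGo t
    else c :: altGo t
termination_by l => l.length
decreasing_by all_goals simp

def aplicar_abreviaciones_alt (texto : String) : String :=
  String.ofList (altGo texto.toList)

-- ===== PRECONDITION & SPEC =====
-- On texts containing "minutosegundos", A's first pass rewrites the shared 's'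
-- ("minuto"+"segundos" → "minutos.") creating a fresh "minutos" that the second pass
-- abbreviates again (A gives "min.."), while B abbreviates each occurrence once,
-- longest match first ("min.egundos"); the cascade is an artefact of A's pass ordering
-- and B's non-cascading simultaneous replacement is the intended behaviour.
-- D_ holds iff the substring "minutosegundos" occurs in texto (Python: "minutosegundos" in texto).
def D_aplicar_abreviaciones (texto : String) : Prop :=
  PySem.Str.isIn "minutosegundos" texto = true
instance (texto : String) : Decidable (D_aplicar_abreviaciones texto) := by
  unfold D_aplicar_abreviaciones; infer_instance

def Spec_aplicar_abreviaciones (texto : String) (out : String) : Prop :=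
  ¬ D_aplicar_abreviaciones texto → out = aplicar_abreviaciones_alt texto
instance (texto : String) (out : String) : Decidable (Spec_aplicar_abreviaciones texto out) := by
  unfold Spec_aplicar_abreviaciones; infer_instance

def pvDiffWitness_aplicar_abreviaciones : String := "minutosegundos"
def pvDiffWitnessOut_aplicar_abreviaciones : String × String := ("min..", "min.egundos")

-- ===== CLAIM (what is proved, stated in full; the proofs are below) =====
def Claim_unchanged_aplicar_abreviaciones : Prop := ∀ (texto : String), Dom_aplicar_abreviaciones texto → Spec_aplicar_abreviaciones texto (aplicar_abreviaciones texto)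
def Claim_exact_aplicar_abreviaciones : Prop := ∀ (texto : String), Dom_aplicar_abreviaciones texto → D_aplicar_abreviaciones texto → aplicar_abreviaciones texto ≠ aplicar_abreviaciones_alt texto
def Claim_changed_aplicar_abreviaciones : Prop := Dom_aplicar_abreviaciones (pvDiffWitness_aplicar_abreviaciones) ∧ D_aplicar_abreviaciones (pvDiffWitness_aplicar_abreviaciones) ∧ aplicar_abreviaciones (pvDiffWitness_aplicar_abreviaciones) = pvDiffWitnessOut_aplicar_abreviaciones.1 ∧ aplicar_abreviaciones_alt (pvDiffWitness_aplicar_abreviaciones) = pvDiffWitnessOut_aplicar_abreviaciones.2 ∧ pvDiffWitnessOut_aplicar_abreviaciones.1 ≠ pvDiffWitnessOut_aplicar_abreviaciones.2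

-- ===== LEMMAS AND PROOFS =====

-- The recursive shape of one Python str.replace pass (nonempty pattern).
def rep (old new : List Char) : List Char → List Char
  | [] => []
  | c :: t =>
    if old.isPrefixOf (c :: t) then new ++ rep old new (t.drop (old.length - 1))
    else c :: rep old new t
termination_by l => l.length
decreasing_by all_goals simp

theorem go_eq_rep (old new : List Char) (hold : old ≠ []) :
    ∀ (f : Nat) (l acc : List Char), l.length ≤ f →
      PySem.Chars.replace.go old new f l acc = acc.reverse ++ rep old new l := by
  intro f
  induction f with
  | zero =>
    intro l acc hl
    have : l = [] := List.eq_nil_of_length_eq_zero (Nat.le_zero.mp hl)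
    subst this
    simp [PySem.Chars.replace.go, rep]
  | succ f ih =>
    intro l acc hl
    cases l with
    | nil => simp [PySem.Chars.replace.go, rep]
    | cons c t =>
      obtain ⟨o, os, rfl⟩ : ∃ o os, old = o :: os := by
        cases old with
        | nil => exact absurd rfl hold
        | cons o os => exact ⟨o, os, rfl⟩
      rw [show PySem.Chars.replace.go (o :: os) new (f + 1) (c :: t) acc =
          if (o :: os).isPrefixOf (c :: t) = true then
            PySem.Chars.replace.go (o :: os) new f (List.drop (o :: os).length (c :: t)) (new.reverse ++ acc)
          else PySem.Chars.replace.go (o :: os) new f t (c :: acc) from rfl]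
      by_cases hp : (o :: os).isPrefixOf (c :: t) = true
      · rw [if_pos hp]
        have hdrop : List.drop (o :: os).length (c :: t) = t.drop ((o :: os).length - 1) := by
          simp [List.length_cons]
        have hlen : (t.drop ((o :: os).length - 1)).length ≤ f := by
          simp at hl ⊢
          omega
        rw [hdrop, ih _ _ hlen]
        rw [show rep (o :: os) new (c :: t) =
            new ++ rep (o :: os) new (t.drop ((o :: os).length - 1)) from by
          rw [rep]; rw [if_pos hp]]
        simp
      · rw [if_neg hp]
        have hlen : t.length ≤ f := by simp at hl; omega
        rw [ih _ _ hlen]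
        rw [show rep (o :: os) new (c :: t) = c :: rep (o :: os) new t from by
          rw [rep]; rw [if_neg hp]]
        simp

theorem replace_eq_rep (s old new : List Char) (hold : old ≠ []) :
    PySem.Chars.replace s old new = rep old new s := by
  rw [PySem.Chars.replace]
  rw [if_neg (by simp [List.isEmpty_iff, hold])]
  simpa using go_eq_rep old new hold s.length s [] le_rfl

-- the three passes of A, in order
def r1 (l : List Char) : List Char := rep segClave ['s', '.'] l
def r2 (l : List Char) : List Char := rep minClave ['m', 'i', 'n', '.'] l
def r3 (l : List Char) : List Char := rep [','] [' ', ',', ' '] l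

theorem isPrefixOf_cons_ne {o c : Char} (os t : List Char) (h : c ≠ o) :
    (o :: os).isPrefixOf (c :: t) = false := by
  simp [List.isPrefixOf]
  intro h'
  exact absurd h'.symm h

theorem rep_cons_ne {o c : Char} (os new t : List Char) (h : c ≠ o) :
    rep (o :: os) new (c :: t) = c :: rep (o :: os) new t := by
  rw [rep, if_neg (by simp [isPrefixOf_cons_ne os t h])]

theorem r1_cons {c : Char} (t : List Char) (h : c ≠ 's') : r1 (c :: t) = c :: r1 t := by
  rw [r1, show segClave = 's' :: ['e', 'g', 'u', 'n', 'd', 'o', 's'] from rfl,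
      rep_cons_ne _ _ _ h]; rfl

theorem r2_cons {c : Char} (t : List Char) (h : c ≠ 'm') : r2 (c :: t) = c :: r2 t := by
  rw [r2, show minClave = 'm' :: ['i', 'n', 'u', 't', 'o', 's'] from rfl,
      rep_cons_ne _ _ _ h]; rfl

theorem r3_cons {c : Char} (t : List Char) (h : c ≠ ',') : r3 (c :: t) = c :: r3 t := by
  rw [r3, show ([','] : List Char) = ',' :: [] from rfl, rep_cons_ne _ _ _ h]; rfl

-- A unfolded to the three PySem.Chars.replace passes, in order
theorem A_eq_chars (texto : String) :
    aplicar_abreviaciones texto = String.ofList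
      (PySem.Chars.replace
        (PySem.Chars.replace
          (PySem.Chars.replace texto.toList "segundos".toList "s.".toList)
          "minutos".toList "min.".toList)
        ",".toList " , ".toList) := by
  have hsorted :
      PySem.List.sorted (PySem.Dict.ofList
          [("segundos", "s."), ("minutos", "min."), (",", " , ")] : PySem.Dict String String).keys
        (fun k => (PySem.Str.len k : Int)) true = ["segundos", "minutos", ","] := by decide
  rw [aplicar_abreviaciones]
  rw [hsorted]
  simp only [List.foldl]
  rw [show (PySem.Dict.ofList
        [("segundos", "s."), ("minutos", "min."), (",", " , ")] : PySem.Dict String String).getD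
        "segundos" "" = "s." from by decide]
  rw [show (PySem.Dict.ofList
        [("segundos", "s."), ("minutos", "min."), (",", " , ")] : PySem.Dict String String).getD
        "minutos" "" = "min." from by decide]
  rw [show (PySem.Dict.ofList
        [("segundos", "s."), ("minutos", "min."), (",", " , ")] : PySem.Dict String String).getD
        "," "" = " , " from by decide]
  rw [PySem.Str.replace, PySem.Str.replace, PySem.Str.replace]
  rw [String.toList_ofList, String.toList_ofList]

-- A as the composition of the three rep passes
theorem A_eq (texto : String) :
    aplicar_abreviaciones texto = String.ofList (r3 (r2 (r1 texto.toList))) := by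
  rw [A_eq_chars]
  rw [replace_eq_rep _ _ _ (by decide), replace_eq_rep _ _ _ (by decide),
      replace_eq_rep _ _ _ (by decide)]
  rw [show ("segundos" : String).toList = segClave from rfl,
      show ("minutos" : String).toList = minClave from rfl]
  rfl

-- stepping an 'a ≠ 's'' character through a prefix of a pass-1 result
theorem cons_prefix_r1 {a : Char} (ha : a ≠ 's') {q t : List Char}
    (h : (a :: q) <+: r1 t) : ∃ t', t = a :: t' ∧ q <+: r1 t' := by
  cases t with
  | nil =>
    rw [r1, rep] at h
    exact absurd (List.IsPrefix.length_le h) (by simp)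
  | cons d t' =>
    by_cases hp : segClave.isPrefixOf (d :: t') = true
    · rw [r1, rep, if_pos hp] at h
      have : a = 's' := (List.cons_prefix_cons.mp h).1
      exact absurd this ha
    · rw [r1, rep, if_neg hp] at h
      obtain ⟨h1, h2⟩ := List.cons_prefix_cons.mp h
      exact ⟨t', by rw [h1], h2⟩

theorem s_prefix_r1 {t : List Char} (h : ['s'] <+: r1 t) : ∃ u, t = 's' :: u := by
  cases t with
  | nil =>
    rw [r1, rep] at h
    exact absurd (List.IsPrefix.length_le h) (by simp)
  | cons d t' =>
    by_cases hp : segClave.isPrefixOf (d :: t') = true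
    · have hpre : segClave <+: (d :: t') := List.isPrefixOf_iff_prefix.mp hp
      obtain ⟨rest, hrest⟩ := hpre
      have hd : d = 's' := by
        have := congrArg (fun l => l.head?) hrest
        simpa [segClave] using this.symm
      exact ⟨t', by rw [hd]⟩
    · rw [r1, rep, if_neg hp] at h
      have hd : d = 's' := ((List.cons_prefix_cons.mp h).1).symm
      exact ⟨t', by rw [hd]⟩

-- if "minutos" prefixes c :: r1 t then "minutos" already prefixed c :: t
theorem min_prefix_transfer {c : Char} {t : List Char}
    (h : minClave <+: c :: r1 t) : minClave <+: c :: t := by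
  rw [show minClave = 'm' :: ['i', 'n', 'u', 't', 'o', 's'] from rfl] at h ⊢
  obtain ⟨hc, h0⟩ := List.cons_prefix_cons.mp h
  obtain ⟨t1, rfl, g1⟩ := cons_prefix_r1 (by decide) h0
  obtain ⟨t2, rfl, g2⟩ := cons_prefix_r1 (by decide) g1
  obtain ⟨t3, rfl, g3⟩ := cons_prefix_r1 (by decide) g2
  obtain ⟨t4, rfl, g4⟩ := cons_prefix_r1 (by decide) g3
  obtain ⟨t5, rfl, g5⟩ := cons_prefix_r1 (by decide) g4
  obtain ⟨u, rfl⟩ := s_prefix_r1 g5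
  exact List.cons_prefix_cons.mpr ⟨hc, by simp⟩

-- the pattern "minutosegundos", as a character list
def msL : List Char := ['m', 'i', 'n', 'u', 't', 'o', 's', 'e', 'g', 'u', 'n', 'd', 'o', 's']

theorem infix_imp_D (texto : String) (h : msL <:+: texto.toList) :
    D_aplicar_abreviaciones texto := by
  rw [D_aplicar_abreviaciones]
  exact (PySem.Str.isIn_iff_infix _ _).mpr h

theorem D_imp_infix (texto : String) (h : D_aplicar_abreviaciones texto) :
    msL <:+: texto.toList := by
  rw [D_aplicar_abreviaciones] at h
  exact (PySem.Str.isIn_iff_infix _ _).mp h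

theorem infix_cons_elim {c : Char} {q t : List Char} (hc : c ≠ 'm')
    (h : ('m' :: q) <:+: (c :: t)) : ('m' :: q) <:+: t := by
  rcases List.infix_cons_iff.mp h with hp | hi
  · exact absurd ((List.cons_prefix_cons.mp hp).1).symm hc
  · exact hi

theorem altGo_cons_plain {c : Char} (t : List Char) (h1 : c ≠ 's') (h2 : c ≠ 'm')
    (h3 : c ≠ ',') : altGo (c :: t) = c :: altGo t := by
  have hs : segClave.isPrefixOf (c :: t) = false := by
    rw [show segClave = 's' :: ['e', 'g', 'u', 'n', 'd', 'o', 's'] from rfl]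
    exact isPrefixOf_cons_ne _ _ h1
  have hm : minClave.isPrefixOf (c :: t) = false := by
    rw [show minClave = 'm' :: ['i', 'n', 'u', 't', 'o', 's'] from rfl]
    exact isPrefixOf_cons_ne _ _ h2
  rw [altGo, if_neg (by simp [hs]), if_neg (by simp [hm]), if_neg h3]

-- A's three passes, one head step at a time: "segundos" matched at the head
theorem stepA_seg (c : Char) (t : List Char) (hseg : segClave.isPrefixOf (c :: t) = true) :
    r3 (r2 (r1 (c :: t))) = 's' :: '.' :: r3 (r2 (r1 (t.drop 7))) := by
  obtain ⟨rest, hrest⟩ := List.isPrefixOf_iff_prefix.mp hseg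
  have ht : t = 'e' :: 'g' :: 'u' :: 'n' :: 'd' :: 'o' :: 's' :: rest := by
    have h2 := hrest
    simp [segClave] at h2
    exact h2.2.symm
  have hdrop : t.drop 7 = rest := by rw [ht]; rfl
  have h1 : r1 (c :: t) = 's' :: '.' :: r1 rest := by
    rw [r1, rep, if_pos hseg, ht]
    rfl
  rw [h1, hdrop, r2_cons _ (by decide), r2_cons _ (by decide),
      r3_cons _ (by decide), r3_cons _ (by decide)]

-- "minutos" matched at the head and no "segundos" overlapping its final 's'
theorem stepA_min (c : Char) (t : List Char) (hmin : minClave.isPrefixOf (c :: t) = true)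
    (hnoseg : segClave.isPrefixOf ('s' :: t.drop 6) = false) :
    r3 (r2 (r1 (c :: t))) = 'm' :: 'i' :: 'n' :: '.' :: r3 (r2 (r1 (t.drop 6))) := by
  obtain ⟨rest, hrest⟩ := List.isPrefixOf_iff_prefix.mp hmin
  have hc : c = 'm' := by
    have := congrArg (fun l => l.head?) hrest
    simpa [minClave] using this.symm
  have ht : t = 'i' :: 'n' :: 'u' :: 't' :: 'o' :: 's' :: rest := by
    have h2 := hrest
    simp [minClave] at h2
    exact h2.2.symm
  have hdrop : t.drop 6 = rest := by rw [ht]; rfl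
  rw [hdrop] at hnoseg ⊢
  have h1 : r1 (c :: t) = 'm' :: 'i' :: 'n' :: 'u' :: 't' :: 'o' :: 's' :: r1 rest := by
    rw [hc, ht]
    rw [r1_cons _ (by decide), r1_cons _ (by decide), r1_cons _ (by decide),
        r1_cons _ (by decide), r1_cons _ (by decide), r1_cons _ (by decide)]
    rw [r1, rep, if_neg (by simp [hnoseg])]
    rfl
  have h2 : r2 ('m' :: 'i' :: 'n' :: 'u' :: 't' :: 'o' :: 's' :: r1 rest) =
      'm' :: 'i' :: 'n' :: '.' :: r2 (r1 rest) := by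
    rw [r2, rep, if_pos (by
      apply List.isPrefixOf_iff_prefix.mpr
      rw [show minClave = ['m', 'i', 'n', 'u', 't', 'o', 's'] from rfl]
      exact ⟨r1 rest, rfl⟩)]
    rfl
  rw [h1, h2, r3_cons _ (by decide), r3_cons _ (by decide), r3_cons _ (by decide),
      r3_cons _ (by decide)]

-- "minutos" matched at the head WITH "segundos" overlapping its final 's'
-- (the text starts with "minutosegundos"): A's pass 1 rewrites the shared 's',
-- creating a fresh "minutos" that pass 2 also abbreviates
theorem stepA_minseg (c : Char) (t : List Char) (hmin : minClave.isPrefixOf (c :: t) = true)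
    (hseg' : segClave.isPrefixOf ('s' :: t.drop 6) = true) :
    r3 (r2 (r1 (c :: t))) = 'm' :: 'i' :: 'n' :: '.' :: '.' :: r3 (r2 (r1 (t.drop 13))) := by
  obtain ⟨rest, hrest⟩ := List.isPrefixOf_iff_prefix.mp hmin
  have hc : c = 'm' := by
    have := congrArg (fun l => l.head?) hrest
    simpa [minClave] using this.symm
  have ht : t = 'i' :: 'n' :: 'u' :: 't' :: 'o' :: 's' :: rest := by
    have h2 := hrest
    simp [minClave] at h2
    exact h2.2.symm
  have hdrop : t.drop 6 = rest := by rw [ht]; rfl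
  rw [hdrop] at hseg'
  obtain ⟨w, hw⟩ := List.isPrefixOf_iff_prefix.mp hseg'
  have hrw : rest = 'e' :: 'g' :: 'u' :: 'n' :: 'd' :: 'o' :: 's' :: w := by
    have h2 := hw
    simp [segClave] at h2
    exact h2.symm
  have hdrop13 : t.drop 13 = w := by rw [ht, hrw]; rfl
  have h1 : r1 (c :: t) = 'm' :: 'i' :: 'n' :: 'u' :: 't' :: 'o' :: 's' :: '.' :: r1 w := by
    rw [hc, ht, hrw]
    rw [r1_cons _ (by decide), r1_cons _ (by decide), r1_cons _ (by decide),
        r1_cons _ (by decide), r1_cons _ (by decide), r1_cons _ (by decide)]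
    rw [r1, rep, if_pos (by
      apply List.isPrefixOf_iff_prefix.mpr
      exact ⟨w, rfl⟩)]
    rfl
  have h2 : r2 ('m' :: 'i' :: 'n' :: 'u' :: 't' :: 'o' :: 's' :: '.' :: r1 w) =
      'm' :: 'i' :: 'n' :: '.' :: '.' :: r2 (r1 w) := by
    rw [r2, rep, if_pos (by
      apply List.isPrefixOf_iff_prefix.mpr
      rw [show minClave = ['m', 'i', 'n', 'u', 't', 'o', 's'] from rfl]
      exact ⟨'.' :: r1 w, rfl⟩)]
    rw [show List.drop (minClave.length - 1) ('i' :: 'n' :: 'u' :: 't' :: 'o' :: 's' :: '.' :: r1 w) =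
        '.' :: r1 w from rfl]
    rw [show rep minClave ['m', 'i', 'n', '.'] ('.' :: r1 w) =
        '.' :: rep minClave ['m', 'i', 'n', '.'] (r1 w) from by
      rw [show minClave = 'm' :: ['i', 'n', 'u', 't', 'o', 's'] from rfl,
          rep_cons_ne _ _ _ (by decide)]]
    rfl
  rw [h1, h2, hdrop13, r3_cons _ (by decide), r3_cons _ (by decide), r3_cons _ (by decide),
      r3_cons _ (by decide), r3_cons _ (by decide)]

-- head is ','
theorem stepA_comma (t : List Char) :
    r3 (r2 (r1 (',' :: t))) = ' ' :: ',' :: ' ' :: r3 (r2 (r1 t)) := by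
  have h1 : r1 (',' :: t) = ',' :: r1 t := r1_cons t (by decide)
  have h2 : r2 (',' :: r1 t) = ',' :: r2 (r1 t) := r2_cons _ (by decide)
  have h3 : r3 (',' :: r2 (r1 t)) = ' ' :: ',' :: ' ' :: r3 (r2 (r1 t)) := by
    rw [r3, rep, if_pos (by apply List.isPrefixOf_iff_prefix.mpr; exact ⟨_, rfl⟩)]
    rfl
  rw [h1, h2, h3]

-- ordinary head character
theorem stepA_plain (c : Char) (t : List Char)
    (hseg : ¬ segClave.isPrefixOf (c :: t) = true)
    (hmin : ¬ minClave.isPrefixOf (c :: t) = true) (hc : c ≠ ',') :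
    r3 (r2 (r1 (c :: t))) = c :: r3 (r2 (r1 t)) := by
  have h1 : r1 (c :: t) = c :: r1 t := by
    rw [r1, rep, if_neg (by simpa using hseg)]
    rfl
  have h2 : r2 (c :: r1 t) = c :: r2 (r1 t) := by
    rw [r2, rep, if_neg ?_]
    · rfl
    · intro hb
      exact hmin (by
        apply List.isPrefixOf_iff_prefix.mpr
        exact min_prefix_transfer (List.isPrefixOf_iff_prefix.mp hb))
  rw [h1, h2, r3_cons _ hc]

-- if the text starts with "minutos" and "segundos" overlaps its final 's',
-- it starts with "minutosegundos"
theorem prefix_minseg {c : Char} {t : List Char} (hmin : minClave.isPrefixOf (c :: t) = true)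
    (hseg' : segClave.isPrefixOf ('s' :: t.drop 6) = true) : msL <+: (c :: t) := by
  obtain ⟨rest, hrest⟩ := List.isPrefixOf_iff_prefix.mp hmin
  have hc : c = 'm' := by
    have := congrArg (fun l => l.head?) hrest
    simpa [minClave] using this.symm
  have ht : t = 'i' :: 'n' :: 'u' :: 't' :: 'o' :: 's' :: rest := by
    have h2 := hrest
    simp [minClave] at h2
    exact h2.2.symm
  have hdrop : t.drop 6 = rest := by rw [ht]; rfl
  rw [hdrop] at hseg'
  obtain ⟨w, hw⟩ := List.isPrefixOf_iff_prefix.mp hseg'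
  refine ⟨w, ?_⟩
  rw [hc, ht, show msL = 'm' :: 'i' :: 'n' :: 'u' :: 't' :: 'o' :: segClave from rfl]
  simp [hw]

-- the occurrence of "minutosegundos" in "minutos" ++ rest (no overlap at the final 's')
-- lies inside rest
theorem infix_rest_of_min {c : Char} {t : List Char} (h : msL <:+: c :: t)
    (hmin : minClave.isPrefixOf (c :: t) = true)
    (hseg' : ¬ segClave.isPrefixOf ('s' :: t.drop 6) = true) : msL <:+: t.drop 6 := by
  obtain ⟨rest, hrest⟩ := List.isPrefixOf_iff_prefix.mp hmin
  have ht : t = 'i' :: 'n' :: 'u' :: 't' :: 'o' :: 's' :: rest := by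
    have h2 := hrest
    simp [minClave] at h2
    exact h2.2.symm
  have hdrop : t.drop 6 = rest := by rw [ht]; rfl
  rw [hdrop]
  rcases List.infix_cons_iff.mp h with hp | hi
  · exfalso
    rw [show msL = 'm' :: 'i' :: 'n' :: 'u' :: 't' :: 'o' :: segClave from rfl, ht] at hp
    have p1 := (List.cons_prefix_cons.mp hp).2
    have p2 := (List.cons_prefix_cons.mp p1).2
    have p3 := (List.cons_prefix_cons.mp p2).2
    have p4 := (List.cons_prefix_cons.mp p3).2
    have p5 := (List.cons_prefix_cons.mp p4).2
    have p6 := (List.cons_prefix_cons.mp p5).2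
    exact hseg' (List.isPrefixOf_iff_prefix.mpr (by rw [hdrop]; exact p6))
  · rw [show msL = 'm' :: ('i' :: 'n' :: 'u' :: 't' :: 'o' :: segClave) from rfl] at hi ⊢
    rw [ht] at hi
    exact infix_cons_elim (by decide) (infix_cons_elim (by decide) (infix_cons_elim (by decide)
      (infix_cons_elim (by decide) (infix_cons_elim (by decide) (infix_cons_elim (by decide) hi)))))

-- main equivalence outside D_
theorem main_eq (l : List Char) (h : ¬ (msL <:+: l)) :
    r3 (r2 (r1 l)) = altGo l := by
  induction l using altGo.induct with
  | case1 => simp [r1, r2, r3, rep, altGo]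
  | case2 c t hseg ih =>
    have hrest_inf : ¬ (msL <:+: t.drop 7) := fun hinf =>
      h (hinf.trans (((List.drop_suffix 7 t).trans (List.suffix_cons c t)).isInfix))
    rw [stepA_seg c t hseg, altGo, if_pos hseg, ih hrest_inf]
  | case3 c t hseg hmin ih =>
    by_cases hseg' : segClave.isPrefixOf ('s' :: t.drop 6) = true
    · exact absurd (prefix_minseg hmin hseg').isInfix h
    · have hrest_inf : ¬ (msL <:+: t.drop 6) := fun hinf =>
        h (hinf.trans (((List.drop_suffix 6 t).trans (List.suffix_cons c t)).isInfix))
      rw [stepA_min c t hmin (by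
        cases hx : segClave.isPrefixOf ('s' :: t.drop 6) with
        | true => exact absurd hx hseg'
        | false => rfl), altGo, if_neg (by simp [hseg]),
          if_pos hmin, ih hrest_inf]
  | case4 t hseg hmin ih =>
    have ht_inf : ¬ (msL <:+: t) := fun hinf =>
      h (hinf.trans (List.IsSuffix.isInfix ⟨[','], rfl⟩))
    rw [stepA_comma t, altGo, if_neg (by simp [hseg]), if_neg (by simp [hmin]), if_pos rfl,
        ih ht_inf]
  | case5 c t hseg hmin hcomma ih =>
    have ht_inf : ¬ (msL <:+: t) := fun hinf =>
      h (hinf.trans (List.IsSuffix.isInfix ⟨[c], rfl⟩))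
    rw [stepA_plain c t hseg hmin hcomma, altGo, if_neg (by simp [hseg]),
        if_neg (by simp [hmin]), if_neg hcomma, ih ht_inf]

-- inside D_ the two results differ EVERYWHERE: at the leftmost "minutosegundos",
-- A produces "min.." where B produces "min.e…"
theorem neq_of_infix (l : List Char) (h : msL <:+: l) :
    r3 (r2 (r1 l)) ≠ altGo l := by
  induction l using altGo.induct with
  | case1 =>
    rw [List.infix_nil] at h
    exact absurd h (by decide)
  | case2 c t hseg ih =>
    obtain ⟨rest, hrest⟩ := List.isPrefixOf_iff_prefix.mp hseg
    have hc : c = 's' := by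
      have := congrArg (fun l => l.head?) hrest
      simpa [segClave] using this.symm
    have ht : t = 'e' :: 'g' :: 'u' :: 'n' :: 'd' :: 'o' :: 's' :: rest := by
      have h2 := hrest
      simp [segClave] at h2
      exact h2.2.symm
    have hdrop : t.drop 7 = rest := by rw [ht]; rfl
    have h7 : msL <:+: t.drop 7 := by
      rw [hdrop]
      rw [show msL = 'm' :: ('i' :: 'n' :: 'u' :: 't' :: 'o' :: segClave) from rfl] at h ⊢
      rw [hc, ht] at h
      exact infix_cons_elim (by decide) (infix_cons_elim (by decide) (infix_cons_elim (by decide)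
        (infix_cons_elim (by decide) (infix_cons_elim (by decide) (infix_cons_elim (by decide)
          (infix_cons_elim (by decide) (infix_cons_elim (by decide) h)))))))
    rw [stepA_seg c t hseg, altGo, if_pos hseg]
    intro heq
    apply ih h7
    simpa using heq
  | case3 c t hseg hmin ih =>
    by_cases hseg' : segClave.isPrefixOf ('s' :: t.drop 6) = true
    · -- the text starts with "minutosegundos": the outputs differ at the fifth character
      obtain ⟨rest, hrest⟩ := List.isPrefixOf_iff_prefix.mp hmin
      have ht : t = 'i' :: 'n' :: 'u' :: 't' :: 'o' :: 's' :: rest := by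
        have h2 := hrest
        simp [minClave] at h2
        exact h2.2.symm
      have hdrop : t.drop 6 = rest := by rw [ht]; rfl
      obtain ⟨w, hw⟩ := List.isPrefixOf_iff_prefix.mp (by rw [hdrop] at hseg'; exact hseg')
      have hrw : rest = 'e' :: 'g' :: 'u' :: 'n' :: 'd' :: 'o' :: 's' :: w := by
        have h2 := hw
        simp [segClave] at h2
        exact h2.symm
      rw [stepA_minseg c t hmin hseg', altGo, if_neg (by simp [hseg]), if_pos hmin,
          hdrop, hrw, altGo_cons_plain _ (by decide) (by decide) (by decide)]
      intro heq
      simp at heq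
    · have h6 : msL <:+: t.drop 6 := infix_rest_of_min h hmin hseg'
      rw [stepA_min c t hmin (by
        cases hx : segClave.isPrefixOf ('s' :: t.drop 6) with
        | true => exact absurd hx hseg'
        | false => rfl), altGo, if_neg (by simp [hseg]),
          if_pos hmin]
      intro heq
      apply ih h6
      simpa using heq
  | case4 t hseg hmin ih =>
    have h0 : msL <:+: t := by
      rw [show msL = 'm' :: ('i' :: 'n' :: 'u' :: 't' :: 'o' :: segClave) from rfl] at h ⊢
      exact infix_cons_elim (by decide) h
    rw [stepA_comma t, altGo, if_neg (by simp [hseg]), if_neg (by simp [hmin]), if_pos rfl]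
    intro heq
    apply ih h0
    simpa using heq
  | case5 c t hseg hmin hcomma ih =>
    have h0 : msL <:+: t := by
      rcases List.infix_cons_iff.mp h with hp | hi
      · exfalso
        apply hmin
        apply List.isPrefixOf_iff_prefix.mpr
        exact List.IsPrefix.trans (show minClave <+: msL from by decide) hp
      · exact hi
    rw [stepA_plain c t hseg hmin hcomma, altGo, if_neg (by simp [hseg]),
        if_neg (by simp [hmin]), if_neg hcomma]
    intro heq
    apply ih h0
    simpa using heq

-- ===== VERDICT (by name: the statement is the Claim_ definition above) =====
theorem aplicar_abreviaciones_spec : Claim_unchanged_aplicar_abreviaciones := by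
  intro texto _ hD
  have hinf : ¬ (msL <:+: texto.toList) := fun hinf => hD (infix_imp_D texto hinf)
  rw [A_eq, aplicar_abreviaciones_alt, main_eq texto.toList hinf]

theorem aplicar_abreviaciones_tight : Claim_exact_aplicar_abreviaciones := by
  intro texto _ hD heq
  have h2 := congrArg String.toList heq
  rw [A_eq, aplicar_abreviaciones_alt, String.toList_ofList, String.toList_ofList] at h2
  exact neq_of_infix texto.toList (D_imp_infix texto hD) h2

theorem aplicar_abreviaciones_changed : Claim_changed_aplicar_abreviaciones := by
  unfold Claim_changed_aplicar_abreviaciones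
  refine ⟨by decide, by decide, ?_, ?_, by decide⟩
  · show aplicar_abreviaciones "minutosegundos" = "min.."
    rw [A_eq_chars]
    rw [show PySem.Chars.replace
        (PySem.Chars.replace
          (PySem.Chars.replace ("minutosegundos" : String).toList "segundos".toList "s.".toList)
          "minutos".toList "min.".toList)
        ",".toList " , ".toList = ['m', 'i', 'n', '.', '.'] from by decide]
  · show aplicar_abreviaciones_alt "minutosegundos" = "min.egundos"
    rw [aplicar_abreviaciones_alt]
    rw [show altGo ("minutosegundos" : String).toList = "min.egundos".toList from by
      simp [altGo, segClave, minClave, List.isPrefixOf]]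
    rfl
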